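-- pv_equiv track=rewrite | github.com/TyroneGithub/algcm-problem-sets | chariot arcana/spikes_med.py | solve
-- ===== SOURCE A (Python) =====
-- def solve(k, s, memo):
--     MOD = int(1e9) + 7
--
--     start = 0
--     end = k - 1
--     _sum = 1
--
--     while start < end:
--         spike = s.find('1', start, end)
--
--         if spike != -1:
--             if spike > start:
--                 _sum =  (_sum % MOD * jumps(spike - start - 1, memo) % MOD) % MOD
--                 start = spike + 1
--             else:
--                 _sum = 0
--                 break
--         else:
--             _sum = (_sum % MOD * jumps(end - start, memo) % MOD) % MOD
--             break
--
--     return _sum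
--
-- def jumps(k, memo):
--     # number of jumps to nth square = number of jumps to n-1 + n-2
--     # logic: one square left, two squares left
--     # zero-based index; (k-1) at first
--
--     SENTINEL = -1
--     MOD = int(1e9) + 7
--
--     if memo[k] != SENTINEL:
--         return memo[k]
--     if k <= 1:
--         return 1
--     else:
--         memo[k] = (jumps(k - 1, memo) % MOD + jumps(k - 2, memo) % MOD) % MOD
--         return memo[k]
-- ===== SOURCE B (Python) =====
-- MOD = 10 ** 9 + 7
--
--
-- def _jumps_dp(k, memo):
--     # bottom-up DP replacing A's top-down memoized recursion
--     if memo[k] != -1: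
--         return memo[k]
--     if k <= 1:
--         return 1
--     for i in range(2, k + 1):
--         if memo[i] == -1:
--             a = memo[i - 1] if memo[i - 1] != -1 else 1
--             b = memo[i - 2] if memo[i - 2] != -1 else 1
--             memo[i] = (a % MOD + b % MOD) % MOD
--     return memo[k]
--
--
-- def solve(k, s, memo):
--     total = 1
--     start = 0
--     end = k - 1
--     while start < end:
--         spike = s.find('1', start, end)
--         if spike == -1:
--             return (total % MOD * _jumps_dp(end - start, memo) % MOD) % MOD
--         if spike == start:
--             return 0
--         total = (total % MOD * _jumps_dp(spike - start - 1, memo) % MOD) % MOD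
--         start = spike + 1
--     return total
-- ===== Notes on version B (the rewrite author's own statement) =====
-- stated objective: alternative
-- what changed: The jumps helper is reimplemented as an iterative bottom-up DP loop filling memo[2..k] instead of A's top-down memoized double recursion (and solve's scan uses early returns instead of break flags); B also cannot hit Python's recursion limit.
-- outside the precondition, e.g. on solve(4, '011', [-1]): A returns 0, B returns 0; on solve(6, '0101', [3, 3]): A returns 27, B returns 27
import Mathlib
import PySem

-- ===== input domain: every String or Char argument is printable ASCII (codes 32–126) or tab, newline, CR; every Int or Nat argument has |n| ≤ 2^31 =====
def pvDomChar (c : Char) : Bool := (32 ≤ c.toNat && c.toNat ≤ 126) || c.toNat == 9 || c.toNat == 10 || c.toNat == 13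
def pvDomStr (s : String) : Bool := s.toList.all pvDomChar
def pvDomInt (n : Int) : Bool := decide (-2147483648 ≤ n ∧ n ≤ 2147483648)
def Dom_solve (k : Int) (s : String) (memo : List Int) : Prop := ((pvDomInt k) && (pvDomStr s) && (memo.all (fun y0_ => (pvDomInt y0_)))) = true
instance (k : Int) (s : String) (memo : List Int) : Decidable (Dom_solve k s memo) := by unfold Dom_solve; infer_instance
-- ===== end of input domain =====

-- B replaces A's top-down memoized recursion in `jumps` by an iterative bottom-up DP loop.
-- The equivalence claimed is about the RETURN value only: both Pythons mutate `memo`, and B may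
-- fill sentinel cells below k that A's recursion skips (with the same values A would store there).
-- Both ports thread the mutated memo list through; `.getD 0` stands for the IndexError inputs,
-- which Pre_solve excludes.

-- helper equation + lemma CITED BY loopB's decreasing_by (termination): a found index is ≥ start
theorem chars_findFrom_some_eq (s sub : List Char) (st e : Int) :
    PySem.Chars.findFrom s sub st (some e) =
      (if (if (s.length : Int) < e then (s.length : Int) else if e < 0 then (if e + s.length < 0 then 0 else e + s.length) else e)
          < (if st < 0 then (if st + s.length < 0 then 0 else st + s.length) else st) then -1
       else
        (if PySem.Chars.find (List.drop (if st < 0 then (if st + s.length < 0 then 0 else st + s.length) else st).toNat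
              (List.take (if (s.length : Int) < e then (s.length : Int) else if e < 0 then (if e + s.length < 0 then 0 else e + s.length) else e).toNat s)) sub = -1
         then -1
         else (if st < 0 then (if st + s.length < 0 then 0 else st + s.length) else st) +
           PySem.Chars.find (List.drop (if st < 0 then (if st + s.length < 0 then 0 else st + s.length) else st).toNat
              (List.take (if (s.length : Int) < e then (s.length : Int) else if e < 0 then (if e + s.length < 0 then 0 else e + s.length) else e).toNat s)) sub)) := rfl

theorem str_findFrom_ge (s sub : String) (st e : Int)
    (h : PySem.Str.findFrom s sub st (some e) ≠ -1) :
    st ≤ PySem.Str.findFrom s sub st (some e) := by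
  rw [PySem.Str.findFrom_eq, chars_findFrom_some_eq] at *
  have hr := PySem.Chars.neg_one_le_find (List.drop (if st < 0 then (if st + s.toList.length < 0 then 0 else st + s.toList.length) else st).toNat
              (List.take (if (s.toList.length : Int) < e then (s.toList.length : Int) else if e < 0 then (if e + s.toList.length < 0 then 0 else e + s.toList.length) else e).toNat s.toList)) sub.toList
  split_ifs at * <;> omega

-- ===== PORT A =====
-- jumps(k, memo): top-down memoized recursion; returns (value, new memo); none = IndexError
def jumpsA (k : Int) (memo : List Int) : Option (Int × List Int) :=
  match PySem.List.pyGet? memo k with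
  | none => none
  | some v =>
    if v ≠ -1 then some (v, memo)
    else if _h : k ≤ 1 then some (1, memo)
    else
      match jumpsA (k - 1) memo with
      | none => none
      | some (a, m1) =>
        match jumpsA (k - 2) m1 with
        | none => none
        | some (b, m2) =>
          let w := PySem.Int.mod (PySem.Int.mod a 1000000007 + PySem.Int.mod b 1000000007) 1000000007
          some (w, m2.set k.toNat w)
termination_by k.toNat
decreasing_by all_goals omega

-- the while loop of A's solve (start/end/_sum as parameters)
def loopA (s : String) (endI start sum : Int) (memo : List Int) : Option Int :=
  if _h : start < endI then
    let spike := PySem.Str.findFrom s "1" start (some endI)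
    if spike ≠ -1 then
      if _h2 : spike > start then
        match jumpsA (spike - start - 1) memo with
        | none => none
        | some (j, m') =>
          loopA s endI (spike + 1)
            (PySem.Int.mod (PySem.Int.mod (PySem.Int.mod sum 1000000007 * j) 1000000007) 1000000007) m'
      else some 0
    else
      match jumpsA (endI - start) memo with
      | none => none
      | some (j, _) =>
        some (PySem.Int.mod (PySem.Int.mod (PySem.Int.mod sum 1000000007 * j) 1000000007) 1000000007)
  else some sum
termination_by (endI - start).toNat
decreasing_by omega

def solve (k : Int) (s : String) (memo : List Int) : Int :=
  (loopA s (k - 1) 0 1 memo).getD 0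

-- ===== PORT B =====
-- Source B: `memo[i] if memo[i] != -1 else 1` (all reachable reads are in range; the default is never hit)
def jgetB (memo : List Int) (i : Nat) : Int :=
  match memo[i]? with
  | some v => if v ≠ -1 then v else 1
  | none => 1

-- Source B: `for i in range(2, k+1): if memo[i] == -1: memo[i] = (a % MOD + b % MOD) % MOD`
def fillB (kk : Nat) (i : Nat) (memo : List Int) : List Int :=
  if _h : i ≤ kk then
    fillB kk (i + 1)
      (if memo[i]?.getD 0 = -1 then
        memo.set i (PySem.Int.mod
          (PySem.Int.mod (jgetB memo (i - 1)) 1000000007 + PySem.Int.mod (jgetB memo (i - 2)) 1000000007)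
          1000000007)
      else memo)
  else memo
termination_by kk + 1 - i

-- _jumps_dp(k, memo): bottom-up DP
def jumpsB (k : Int) (memo : List Int) : Option (Int × List Int) :=
  match PySem.List.pyGet? memo k with
  | none => none
  | some v =>
    if v ≠ -1 then some (v, memo)
    else if k ≤ 1 then some (1, memo)
    else
      let m' := fillB k.toNat 2 memo
      match PySem.List.pyGet? m' k with
      | none => none
      | some w => some (w, m')

-- the while loop of Source B's solve (early returns instead of break flags)
def loopB (s : String) (endI start total : Int) (memo : List Int) : Option Int :=
  if _h : start < endI then
    let spike := PySem.Str.findFrom s "1" start (some endI)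
    if hns : spike = -1 then
      match jumpsB (endI - start) memo with
      | none => none
      | some (j, _) =>
        some (PySem.Int.mod (PySem.Int.mod (PySem.Int.mod total 1000000007 * j) 1000000007) 1000000007)
    else if _he : spike = start then some 0
    else
      match jumpsB (spike - start - 1) memo with
      | none => none
      | some (j, m') =>
        loopB s endI (spike + 1)
          (PySem.Int.mod (PySem.Int.mod (PySem.Int.mod total 1000000007 * j) 1000000007) 1000000007) m'
  else some total
termination_by (endI - start).toNat
decreasing_by
  have hge := str_findFrom_ge s "1" start endI hns
  omega

def solve_alt (k : Int) (s : String) (memo : List Int) : Int :=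
  (loopB s (k - 1) 0 1 memo).getD 0

-- ===== PRECONDITION & SPEC =====
-- Pre_solve conservatively requires memo to hold at least k entries (a bound for every index the
-- jumps helper can probe) unless k ≤ 1 (the loop never runs) or s starts with '1' (immediate 0);
-- A also returns on some shorter memos when the spikes keep every probed index small or stop the
-- scan early — B agrees there — but the exact no-IndexError condition depends on the scan trajectory.
def Pre_solve (k : Int) (s : String) (memo : List Int) : Prop :=
  k ≤ 1 ∨ k ≤ (memo.length : Int) ∨ s.toList.head? = some '1'
instance (k : Int) (s : String) (memo : List Int) : Decidable (Pre_solve k s memo) := by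
  unfold Pre_solve; infer_instance

def pvWitness_solve : Int × String × List Int := (3, "010", [-1, -1, -1])

def Spec_solve (k : Int) (s : String) (memo : List Int) (out : Int) : Prop := out = solve_alt k s memo
instance (k : Int) (s : String) (memo : List Int) (out : Int) : Decidable (Spec_solve k s memo out) := by unfold Spec_solve; infer_instance

-- ===== CLAIM (what is proved, stated in full; the proofs are below) =====
def Claim_equal_solve : Prop := ∀ (k : Int) (s : String) (memo : List Int), Dom_solve k s memo → Pre_solve k s memo → Spec_solve k s memo (solve k s memo)

-- ===== LEMMAS AND PROOFS =====

-- the value A's jumps(i, memo) returns, as a pure function of the current memo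
def Ffib (memo : List Int) (i : Nat) : Int :=
  match memo[i]? with
  | none => 0
  | some v =>
    if v ≠ -1 then v
    else if _h : i ≤ 1 then 1
    else PySem.Int.mod
      (PySem.Int.mod (Ffib memo (i - 1)) 1000000007 + PySem.Int.mod (Ffib memo (i - 2)) 1000000007)
      1000000007
termination_by i
decreasing_by all_goals omega

theorem Ffib_ne_neg_one (memo : List Int) (i : Nat) (v : Int) (h : memo[i]? = some v) :
    Ffib memo i ≠ -1 := by
  rw [Ffib, h]
  dsimp only
  have hm := PySem.Int.mod_nonneg
    (PySem.Int.mod (Ffib memo (i - 1)) 1000000007 + PySem.Int.mod (Ffib memo (i - 2)) 1000000007)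
    (by norm_num : (0:Int) < 1000000007)
  split_ifs <;> omega

theorem Ffib_set_self (memo : List Int) (i : Nat) : ∀ (j : Nat),
    Ffib (memo.set i (Ffib memo i)) j = Ffib memo j := by
  intro j
  induction j using Nat.strong_induction_on with
  | _ j IH =>
    by_cases hij : i = j
    · subst hij
      by_cases hin : i < memo.length
      · conv_lhs => rw [Ffib]
        rw [List.getElem?_set, if_pos rfl, if_pos hin]
        dsimp only
        have hv := Ffib_ne_neg_one memo i memo[i] (List.getElem?_eq_getElem hin)
        rw [if_pos hv]
      · have : memo.set i (Ffib memo i) = memo := by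
          apply List.set_eq_of_length_le; omega
        rw [this]
    · conv_lhs => rw [Ffib]
      conv_rhs => rw [Ffib]
      rw [List.getElem?_set, if_neg hij]
      cases hg : memo[j]? with
      | none => rfl
      | some v =>
        dsimp only
        by_cases hv : v ≠ -1
        · rw [if_pos hv, if_pos hv]
        · rw [if_neg hv, if_neg hv]
          by_cases hj1 : j ≤ 1
          · rw [dif_pos hj1, dif_pos hj1]
          · rw [dif_neg hj1, dif_neg hj1, IH (j-1) (by omega), IH (j-2) (by omega)]

theorem jumpsA_spec (n : Nat) : ∀ (k : Int) (memo : List Int), k.toNat ≤ n → 0 ≤ k →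
    k.toNat < memo.length →
    ∃ m', jumpsA k memo = some (Ffib memo k.toNat, m') ∧ m'.length = memo.length ∧
      ∀ j, Ffib m' j = Ffib memo j := by
  induction n with
  | zero =>
    intro k memo hkn h0 hin
    refine ⟨memo, ?_, rfl, fun j => rfl⟩
    rw [jumpsA, PySem.List.pyGet?_of_nonneg memo h0, List.getElem?_eq_getElem hin]
    dsimp only
    have hk1 : k ≤ 1 := by omega
    conv_rhs => rw [Ffib, List.getElem?_eq_getElem hin]
    dsimp only
    by_cases hv : memo[k.toNat] ≠ -1
    · rw [if_pos hv, if_pos hv]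
    · rw [if_neg hv, if_neg hv, dif_pos hk1, dif_pos (by omega : k.toNat ≤ 1)]
  | succ n IH =>
    intro k memo hkn h0 hin
    rw [jumpsA, PySem.List.pyGet?_of_nonneg memo h0, List.getElem?_eq_getElem hin]
    dsimp only
    by_cases hv : memo[k.toNat] ≠ -1
    · refine ⟨memo, ?_, rfl, fun j => rfl⟩
      rw [if_pos hv]
      conv_rhs => rw [Ffib, List.getElem?_eq_getElem hin]
      dsimp only
      rw [if_pos hv]
    · rw [if_neg hv]
      by_cases hk1 : k ≤ 1
      · refine ⟨memo, ?_, rfl, fun j => rfl⟩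
        rw [dif_pos hk1]
        conv_rhs => rw [Ffib, List.getElem?_eq_getElem hin]
        dsimp only
        rw [if_neg hv, dif_pos (by omega : k.toNat ≤ 1)]
      · rw [dif_neg hk1]
        obtain ⟨m1, he1, hl1, hf1⟩ := IH (k-1) memo (by omega) (by omega) (by omega)
        obtain ⟨m2, he2, hl2, hf2⟩ := IH (k-2) m1 (by omega) (by omega) (by omega)
        rw [he1]; dsimp only; rw [he2]; dsimp only; rw [hf1]
        set w := PySem.Int.mod
          (PySem.Int.mod (Ffib memo (k-1).toNat) 1000000007 +
            PySem.Int.mod (Ffib memo (k-2).toNat) 1000000007) 1000000007 with hw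
        have hFk : Ffib memo k.toNat = w := by
          rw [Ffib, List.getElem?_eq_getElem hin]
          dsimp only
          rw [if_neg hv, dif_neg (by omega : ¬ k.toNat ≤ 1), hw,
            (by omega : (k-1).toNat = k.toNat - 1), (by omega : (k-2).toNat = k.toNat - 2)]
        have hwm2 : w = Ffib m2 k.toNat := by rw [hf2, hf1, hFk]
        refine ⟨m2.set k.toNat w, ?_, by simp [hl2, hl1], fun j => ?_⟩
        · rw [hFk]
        · rw [hwm2, Ffib_set_self m2 k.toNat j, hf2, hf1]

theorem jgetB_eq (memo m : List Int) (t : Nat) (hlen : m.length = memo.length)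
    (htlen : t < memo.length)
    (hcase : (2 ≤ t ∧ m[t]? = some (Ffib memo t)) ∨ (t ≤ 1 ∧ m[t]? = memo[t]?)) :
    jgetB m t = Ffib memo t := by
  rcases hcase with ⟨h2, hg⟩ | ⟨h1, hg⟩
  · rw [jgetB, hg]
    dsimp only
    rw [if_pos (Ffib_ne_neg_one memo t memo[t] (List.getElem?_eq_getElem htlen))]
  · rw [jgetB, hg, List.getElem?_eq_getElem htlen]
    dsimp only
    conv_rhs => rw [Ffib, List.getElem?_eq_getElem htlen]
    dsimp only
    by_cases hv : memo[t] ≠ -1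
    · rw [if_pos hv, if_pos hv]
    · rw [if_neg hv, if_neg hv, dif_pos h1]

theorem fillB_spec (memo : List Int) (kk : Nat) (hkk : kk < memo.length) :
    ∀ (c i : Nat) (m : List Int), kk + 1 - i ≤ c → 2 ≤ i →
    m.length = memo.length →
    (∀ j, Ffib m j = Ffib memo j) →
    (∀ t, 2 ≤ t → t < i → t ≤ kk → m[t]? = some (Ffib memo t)) →
    (∀ t, t < 2 ∨ i ≤ t → m[t]? = memo[t]?) →
    (fillB kk i m).length = memo.length ∧
      (∀ j, Ffib (fillB kk i m) j = Ffib memo j) ∧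
      (∀ t, 2 ≤ t → t ≤ kk → (fillB kk i m)[t]? = some (Ffib memo t)) := by
  intro c
  induction c with
  | zero =>
    intro i m hc hi2 hlen hF h3 h4
    rw [fillB.eq_def, dif_neg (by omega : ¬ i ≤ kk)]
    exact ⟨hlen, hF, fun t ht2 htk => h3 t ht2 (by omega) htk⟩
  | succ c IH =>
    intro i m hc hi2 hlen hF h3 h4
    by_cases hik : i ≤ kk
    · rw [fillB.eq_def, dif_pos hik]
      have hilen : i < memo.length := by omega
      have hmi : m[i]? = memo[i]? := h4 i (Or.inr le_rfl)
      have hmemoi : memo[i]? = some memo[i] := List.getElem?_eq_getElem hilen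
      by_cases hs : memo[i] = -1
      · have hcond : m[i]?.getD 0 = -1 := by rw [hmi, hmemoi]; simpa using hs
        have hja : jgetB m (i - 1) = Ffib memo (i - 1) := by
          apply jgetB_eq memo m (i-1) hlen (by omega)
          by_cases h12 : 2 ≤ i - 1
          · exact Or.inl ⟨h12, h3 (i-1) h12 (by omega) (by omega)⟩
          · exact Or.inr ⟨by omega, h4 (i-1) (Or.inl (by omega))⟩
        have hjb : jgetB m (i - 2) = Ffib memo (i - 2) := by
          apply jgetB_eq memo m (i-2) hlen (by omega)
          by_cases h22 : 2 ≤ i - 2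
          · exact Or.inl ⟨h22, h3 (i-2) h22 (by omega) (by omega)⟩
          · exact Or.inr ⟨by omega, h4 (i-2) (Or.inl (by omega))⟩
        have hFi : Ffib memo i = PySem.Int.mod
            (PySem.Int.mod (Ffib memo (i-1)) 1000000007 + PySem.Int.mod (Ffib memo (i-2)) 1000000007)
            1000000007 := by
          rw [Ffib, hmemoi]
          dsimp only
          rw [if_neg (by simpa using hs), dif_neg (by omega : ¬ i ≤ 1)]
        rw [if_pos hcond, hja, hjb, ← hFi]
        have hFm : Ffib m i = Ffib memo i := hF i
        rw [← hFm]
        apply IH (i+1) (m.set i (Ffib m i)) (by omega) (by omega)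
        · simp [hlen]
        · intro j; rw [Ffib_set_self, hF]
        · intro t ht2 hti htk
          rw [List.getElem?_set]
          by_cases hti' : i = t
          · subst hti'
            rw [if_pos rfl, if_pos (by omega : i < m.length), hFm]
          · rw [if_neg hti']
            exact h3 t ht2 (by omega) htk
        · intro t ht
          rw [List.getElem?_set, if_neg (by omega : ¬ i = t)]
          exact h4 t (by omega)
      · have hcond : ¬ (m[i]?.getD 0 = -1) := by rw [hmi, hmemoi]; simpa using hs
        rw [if_neg hcond]
        apply IH (i+1) m (by omega) (by omega) hlen hF
        · intro t ht2 hti htk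
          by_cases hti' : t = i
          · subst hti'
            rw [hmi, hmemoi]
            congr 1
            rw [Ffib, hmemoi]
            dsimp only
            rw [if_pos (by simpa using hs)]
          · exact h3 t ht2 (by omega) htk
        · intro t ht
          exact h4 t (by omega)
    · rw [fillB.eq_def, dif_neg hik]
      exact ⟨hlen, hF, fun t ht2 htk => h3 t ht2 (by omega) htk⟩

theorem jumpsB_spec (k : Int) (memo : List Int) (h0 : 0 ≤ k) (hin : k.toNat < memo.length) :
    ∃ m', jumpsB k memo = some (Ffib memo k.toNat, m') ∧ m'.length = memo.length ∧
      ∀ j, Ffib m' j = Ffib memo j := by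
  rw [jumpsB, PySem.List.pyGet?_of_nonneg memo h0, List.getElem?_eq_getElem hin]
  dsimp only
  by_cases hv : memo[k.toNat] ≠ -1
  · refine ⟨memo, ?_, rfl, fun j => rfl⟩
    rw [if_pos hv]
    conv_rhs => rw [Ffib, List.getElem?_eq_getElem hin]
    dsimp only
    rw [if_pos hv]
  · rw [if_neg hv]
    by_cases hk1 : k ≤ 1
    · refine ⟨memo, ?_, rfl, fun j => rfl⟩
      rw [if_pos hk1]
      conv_rhs => rw [Ffib, List.getElem?_eq_getElem hin]
      dsimp only
      rw [if_neg hv, dif_pos (by omega : k.toNat ≤ 1)]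
    · rw [if_neg hk1]
      obtain ⟨hlen, hFcl, hfinal⟩ := fillB_spec memo k.toNat hin (k.toNat + 1) 2 memo
        (by omega) le_rfl rfl (fun j => rfl)
        (fun t ht2 hti htk => by omega)
        (fun t ht => rfl)
      refine ⟨fillB k.toNat 2 memo, ?_, hlen, hFcl⟩
      have hget : PySem.List.pyGet? (fillB k.toNat 2 memo) k = some (Ffib memo k.toNat) := by
        rw [PySem.List.pyGet?_of_nonneg _ h0]
        exact hfinal k.toNat (by omega) le_rfl
      rw [hget]

theorem str_findFrom_lt (s sub : String) (st e : Int) (hst : 0 ≤ st) (he : 0 ≤ e) (hsub : sub.toList ≠ [])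
    (h : PySem.Str.findFrom s sub st (some e) ≠ -1) :
    PySem.Str.findFrom s sub st (some e) < e := by
  rw [PySem.Str.findFrom_eq, chars_findFrom_some_eq] at *
  set sl := (List.drop (if st < 0 then (if st + s.toList.length < 0 then 0 else st + s.toList.length) else st).toNat
              (List.take (if (s.toList.length : Int) < e then (s.toList.length : Int) else if e < 0 then (if e + s.toList.length < 0 then 0 else e + s.toList.length) else e).toNat s.toList)) with hsl
  have hr := PySem.Chars.neg_one_le_find sl sub.toList
  have hlen : sl.length = min (if (s.toList.length : Int) < e then (s.toList.length : Int) else if e < 0 then (if e + s.toList.length < 0 then 0 else e + s.toList.length) else e).toNat s.toList.length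
      - (if st < 0 then (if st + s.toList.length < 0 then 0 else st + s.toList.length) else st).toNat := by
    rw [hsl]; simp [List.length_drop, List.length_take]
  have hrlt : PySem.Chars.find sl sub.toList ≠ -1 → (PySem.Chars.find sl sub.toList).toNat < sl.length := by
    intro hne
    have h0 : 0 ≤ PySem.Chars.find sl sub.toList := by omega
    have hspec := (PySem.Chars.find_spec h0).1
    rcases hspec with ⟨t, ht⟩
    have : (PySem.Chars.find sl sub.toList).toNat ≤ sl.length := by
      have := PySem.Chars.find_le_length sl sub.toList; omega
    by_contra hge
    have : List.drop (PySem.Chars.find sl sub.toList).toNat sl = [] := by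
      apply List.drop_eq_nil_of_le; omega
    rw [this] at ht
    exact hsub (List.append_eq_nil_iff.mp ht).1
  split_ifs at * <;> omega

theorem chars_find_cons_self (c : Char) (t : List Char) : PySem.Chars.find (c :: t) [c] = 0 := by
  have hpre : [c] <+: c :: t := ⟨t, rfl⟩
  have h0 : 0 ≤ PySem.Chars.find (c :: t) [c] := by
    rw [PySem.Chars.find_nonneg_iff]; exact hpre.isInfix
  have hspec := PySem.Chars.find_spec h0
  by_contra hne
  have : 0 < (PySem.Chars.find (c :: t) [c]).toNat := by omega
  exact (hspec.2 0 this) (by simpa using hpre)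

theorem str_findFrom_head (s : String) (e : Int) (hh : s.toList.head? = some '1') (he : 0 < e) :
    PySem.Str.findFrom s "1" 0 (some e) = 0 := by
  obtain ⟨t, hs⟩ : ∃ t, s.toList = '1' :: t := by
    cases h : s.toList with
    | nil => rw [h] at hh; simp at hh
    | cons a t => rw [h] at hh; simp at hh; exact ⟨t, by rw [hh]⟩
  rw [PySem.Str.findFrom_eq, chars_findFrom_some_eq]
  have hsub : ("1" : String).toList = ['1'] := rfl
  rw [hsub, hs]
  have hlen : ('1' :: t).length = t.length + 1 := rfl
  set E : Int := if (('1' :: t).length : Int) < e then (('1' :: t).length : Int)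
      else if e < 0 then (if e + ('1' :: t).length < 0 then 0 else e + ('1' :: t).length) else e with hE
  have hE1 : 1 ≤ E := by rw [hE]; split_ifs <;> omega
  simp only [if_neg (by omega : ¬ ((0:Int) < 0))]
  rw [if_neg (by omega : ¬ E < (0:Int))]
  obtain ⟨m, hm⟩ : ∃ m, E.toNat = m + 1 := ⟨E.toNat - 1, by omega⟩
  have hslice : List.drop (0:Int).toNat (List.take E.toNat ('1' :: t)) = '1' :: List.take m t := by
    rw [hm]; simp [List.take_succ_cons]
  rw [hslice, chars_find_cons_self]
  norm_num

theorem loop_eq (s : String) : ∀ (n : Nat) (endI start total : Int) (mA mB : List Int),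
    (endI - start).toNat ≤ n → 0 ≤ start → mA.length = mB.length →
    endI < (mA.length : Int) → (∀ j, Ffib mA j = Ffib mB j) →
    loopA s endI start total mA = loopB s endI start total mB := by
  intro n
  induction n with
  | zero =>
    intro endI start total mA mB hn h0 hlen hend hF
    rw [loopA.eq_def, loopB.eq_def]
    rw [dif_neg (by omega : ¬ start < endI), dif_neg (by omega : ¬ start < endI)]
  | succ n IH =>
    intro endI start total mA mB hn h0 hlen hend hF
    rw [loopA.eq_def, loopB.eq_def]
    by_cases hlt : start < endI
    · rw [dif_pos hlt, dif_pos hlt]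
      dsimp only
      set spike := PySem.Str.findFrom s "1" start (some endI) with hspike
      by_cases hm1 : spike = -1
      · rw [if_neg (by simpa using hm1), dif_pos hm1]
        have harg0 : 0 ≤ endI - start := by omega
        have hargin : (endI - start).toNat < mA.length := by omega
        obtain ⟨mA', heA, _, _⟩ := jumpsA_spec (endI - start).toNat (endI - start) mA le_rfl harg0 hargin
        obtain ⟨mB', heB, _, _⟩ := jumpsB_spec (endI - start) mB harg0 (by omega)
        rw [heA, heB, hF]
      · have hge : start ≤ spike := str_findFrom_ge s "1" start endI hm1
        have hlt' : spike < endI := str_findFrom_lt s "1" start endI h0 (by omega) (by decide) hm1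
        rw [if_pos (by simpa using hm1), dif_neg hm1]
        by_cases heq : spike = start
        · rw [dif_neg (by omega : ¬ spike > start), dif_pos heq]
        · rw [dif_pos (by omega : spike > start), dif_neg heq]
          have harg0 : 0 ≤ spike - start - 1 := by omega
          have hargin : (spike - start - 1).toNat < mA.length := by omega
          obtain ⟨mA', heA, hlA, hfA⟩ := jumpsA_spec (spike - start - 1).toNat (spike - start - 1) mA le_rfl harg0 hargin
          obtain ⟨mB', heB, hlB, hfB⟩ := jumpsB_spec (spike - start - 1) mB harg0 (by omega)
          rw [heA, heB, hF]
          dsimp only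
          apply IH endI (spike + 1) _ mA' mB' (by omega) (by omega) (by omega) (by omega)
          intro j
          rw [hfA, hF, hfB]
    · rw [dif_neg hlt, dif_neg hlt]

-- ===== VERDICT (by name: the statement is the Claim_ definition above) =====
theorem solve_spec : Claim_equal_solve := by
  intro k s memo _ hpre
  unfold Spec_solve solve solve_alt
  by_cases hk1 : k ≤ 1
  · rw [loopA.eq_def, loopB.eq_def,
      dif_neg (by omega : ¬ (0:Int) < k - 1), dif_neg (by omega : ¬ (0:Int) < k - 1)]
  · rcases hpre with h | hlen | hhead
    · omega
    · rw [loop_eq s (k - 1).toNat (k - 1) 0 1 memo memo (by omega) le_rfl rfl (by omega)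
        (fun j => rfl)]
    · rw [loopA.eq_def, loopB.eq_def,
        dif_pos (by omega : (0:Int) < k - 1), dif_pos (by omega : (0:Int) < k - 1)]
      dsimp only
      rw [str_findFrom_head s (k - 1) hhead (by omega)]
      rw [if_pos (by decide : (0:Int) ≠ -1), dif_neg (by omega : ¬ (0:Int) > 0),
        dif_neg (by decide : ¬ (0:Int) = -1), dif_pos rfl]
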